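-- pv_equiv track=rewrite | github.com/leesumin7766/PyGrammer | infrearn/simulation/1.py | solution
-- ===== SOURCE A (Python) =====
-- def solution(nums) :
--     answer = 0
--     n = len(nums)
--     dx = [-1,0,1,0]
--     dy = [0,1,0,-1]
--
--     for i in range(n) :
--         for j in range(n) :
--             flag = True # 현재 i행j열은 웅덩이가 맞다로 가정
--             for k in range(4):
--                 nx = i + dx[k]
--                 ny = j + dy[k]
--                 if nx >= 0 and nx < n and ny >= 0 and ny < n and nums[i][j] >= nums[nx][ny] :
--                     flag = False
--                     break
--
--             if flag == True:
--                 answer += 1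
--     return answer
-- ===== SOURCE B (Python) =====
-- def solution(nums):
--     n = len(nums)
--     bad = [False] * (n * n)
--     for i in range(n):
--         for j in range(n):
--             if j + 1 < n:
--                 if nums[i][j] >= nums[i][j + 1]:
--                     bad[i * n + j] = True
--                 if nums[i][j + 1] >= nums[i][j]:
--                     bad[i * n + j + 1] = True
--             if i + 1 < n:
--                 if nums[i][j] >= nums[i + 1][j]:
--                     bad[i * n + j] = True
--                 if nums[i + 1][j] >= nums[i][j]:
--                     bad[(i + 1) * n + j] = True
--     return bad.count(False)
-- ===== Notes on version B (the rewrite author's own statement) =====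
-- stated objective: alternative
-- what changed: Replaced the per-cell scan over all four neighbors with break by a single pass over grid edges (right/down neighbor only) that marks both endpoints of any non-strict edge in a flat boolean disqualification table, then counts unmarked cells.
import Mathlib
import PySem

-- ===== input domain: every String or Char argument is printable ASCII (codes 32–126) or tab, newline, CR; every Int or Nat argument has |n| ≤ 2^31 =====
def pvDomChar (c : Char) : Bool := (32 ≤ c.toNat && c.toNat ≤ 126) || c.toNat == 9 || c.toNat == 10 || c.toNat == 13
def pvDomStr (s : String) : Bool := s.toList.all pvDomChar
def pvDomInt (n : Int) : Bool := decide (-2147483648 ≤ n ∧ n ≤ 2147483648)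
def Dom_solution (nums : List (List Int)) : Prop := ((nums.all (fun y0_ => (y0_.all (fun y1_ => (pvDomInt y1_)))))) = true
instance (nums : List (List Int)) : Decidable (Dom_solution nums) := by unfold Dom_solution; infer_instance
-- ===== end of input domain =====

-- B replaces A's per-cell four-neighbor scan (with break) by a single pass over right/down grid
-- edges that marks both endpoints of every non-strict edge in a flat boolean table, then counts
-- the unmarked cells (objective: alternative algorithm, same asymptotic cost).

-- ===== PORT A =====
-- pyGetD's defaults are unreachable: dx/dy indices are 0..3, and the grid accesses are in range
-- on every input admitted by Pre_.
def solution (nums : List (List Int)) : Int :=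
  let n : Int := nums.length
  let dx : List Int := [-1, 0, 1, 0]
  let dy : List Int := [0, 1, 0, -1]
  (PySem.List.pyRange 0 n 1).foldl (fun answer i =>
    (PySem.List.pyRange 0 n 1).foldl (fun answer j =>
      -- 'for k in range(4): if cond: flag = False; break' — flag is True iff no k satisfies cond
      let flag := (PySem.List.pyRange 0 4 1).all (fun k =>
        let nx := i + PySem.List.pyGetD dx k 0
        let ny := j + PySem.List.pyGetD dy k 0
        !(decide (nx ≥ 0) && decide (nx < n) && decide (ny ≥ 0) && decide (ny < n) &&
          decide (PySem.List.pyGetD (PySem.List.pyGetD nums i []) j 0 ≥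
                  PySem.List.pyGetD (PySem.List.pyGetD nums nx []) ny 0)))
      if flag then answer + 1 else answer) answer) 0

-- ===== PORT B =====
-- getD's defaults are unreachable on Pre_ inputs (every accessed row has length ≥ len(nums)).
def solution_alt (nums : List (List Int)) : Int :=
  let n := nums.length
  let g : Nat → Nat → Int := fun i j => (nums.getD i []).getD j 0
  let bad := (List.range n).foldl (fun bad i =>
    (List.range n).foldl (fun bad j =>
      let bad :=
        if j + 1 < n then
          let bad := if g i j ≥ g i (j + 1) then bad.set (i * n + j) true else bad
          if g i (j + 1) ≥ g i j then bad.set (i * n + j + 1) true else bad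
        else bad
      if i + 1 < n then
        let bad := if g i j ≥ g (i + 1) j then bad.set (i * n + j) true else bad
        if g (i + 1) j ≥ g i j then bad.set ((i + 1) * n + j) true else bad
      else bad) bad) (List.replicate (n * n) false)
  (bad.count false : Int)


-- ===== PRECONDITION & SPEC =====
-- Pre_ excludes exactly the ragged inputs on which the Python A raises IndexError (a grid with
-- 2 ≤ len(nums) and some row shorter than len(nums)); for len(nums) ≤ 1 no element is accessed.
def Pre_solution (nums : List (List Int)) : Prop :=
  nums.length ≤ 1 ∨ ∀ row ∈ nums, nums.length ≤ row.length
instance (nums : List (List Int)) : Decidable (Pre_solution nums) := by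
  unfold Pre_solution; infer_instance
def pvWitness_solution : List (List Int) := [[1, 2], [3, 0]]
def Spec_solution (nums : List (List Int)) (out : Int) : Prop := out = solution_alt nums
instance (nums : List (List Int)) (out : Int) : Decidable (Spec_solution nums out) := by
  unfold Spec_solution; infer_instance

-- ===== CLAIM (what is proved, stated in full; the proofs are below) =====
def Claim_equal_solution : Prop := ∀ (nums : List (List Int)),
  Dom_solution nums → Pre_solution nums → Spec_solution nums (solution nums)

-- ===== LEMMAS AND PROOFS =====

def pvG (nums : List (List Int)) (i j : Nat) : Int := (nums.getD i []).getD j 0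

def pvPit (nums : List (List Int)) (i j : Nat) : Bool :=
  !((decide (0 < i) && decide (pvG nums i j ≥ pvG nums (i - 1) j)) ||
    (decide (j + 1 < nums.length) && decide (pvG nums i j ≥ pvG nums i (j + 1))) ||
    (decide (i + 1 < nums.length) && decide (pvG nums i j ≥ pvG nums (i + 1) j)) ||
    (decide (0 < j) && decide (pvG nums i j ≥ pvG nums i (j - 1))))

theorem pvRangeCast (n : Nat) : PySem.List.pyRange 0 (n : Int) 1 = List.map (fun k : Nat => (k : Int)) (List.range n) := by
  rw [PySem.List.pyRange_one]
  simp only [Int.sub_zero, Int.toNat_natCast, zero_add]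

theorem pvFlagA (nums : List (List Int)) (i j : Nat)
    (hi : i < nums.length) (hj : j < nums.length) :
    ((PySem.List.pyRange 0 4 1).all (fun k =>
        let nx := (i : Int) + PySem.List.pyGetD [-1, 0, 1, 0] k 0
        let ny := (j : Int) + PySem.List.pyGetD [0, 1, 0, -1] k 0
        !(decide (nx ≥ 0) && decide (nx < (nums.length : Int)) && decide (ny ≥ 0) &&
          decide (ny < (nums.length : Int)) &&
          decide (PySem.List.pyGetD (PySem.List.pyGetD nums i []) j 0 ≥
                  PySem.List.pyGetD (PySem.List.pyGetD nums nx []) ny 0)))) =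
      pvPit nums i j := by
  have h4 : PySem.List.pyRange 0 4 1 = [0, 1, 2, 3] := by decide
  rw [h4]
  simp only [List.all_cons, List.all_nil, Bool.and_true]
  simp only [show PySem.List.pyGetD [(-1:Int),0,1,0] 0 0 = -1 from by decide,
    show PySem.List.pyGetD [(-1:Int),0,1,0] 1 0 = 0 from by decide,
    show PySem.List.pyGetD [(-1:Int),0,1,0] 2 0 = 1 from by decide,
    show PySem.List.pyGetD [(-1:Int),0,1,0] 3 0 = 0 from by decide,
    show PySem.List.pyGetD [(0:Int),1,0,-1] 0 0 = 0 from by decide,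
    show PySem.List.pyGetD [(0:Int),1,0,-1] 1 0 = 1 from by decide,
    show PySem.List.pyGetD [(0:Int),1,0,-1] 2 0 = 0 from by decide,
    show PySem.List.pyGetD [(0:Int),1,0,-1] 3 0 = -1 from by decide]
  simp only [add_zero,
    show ((i:Int) + 1) = ((i+1 : Nat) : Int) by push_cast; ring,
    show ((j:Int) + 1) = ((j+1 : Nat) : Int) by push_cast; ring,
    PySem.List.pyGetD_natCast]
  by_cases hi0 : 0 < i
  · by_cases hj0 : 0 < j
    · rw [show ((i:Int) + -1) = ((i-1 : Nat) : Int) by omega,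
          show ((j:Int) + -1) = ((j-1 : Nat) : Int) by omega]
      simp only [PySem.List.pyGetD_natCast, pvPit, pvG]
      have f3 : ((j:Int)+1 < (nums.length:Int)) ↔ (j+1 < nums.length) := by omega
      have f4 : ((i:Int)+1 < (nums.length:Int)) ↔ (i+1 < nums.length) := by omega
      have f5 : ((0:Int) ≤ ↑j+1) := by omega
      have f6 : ((0:Int) ≤ ↑i+1) := by omega
      have g1 : 1 ≤ i := hi0
      have g2 : 1 ≤ j := hj0
      simp [hi, hj, g1, g2, hi.le, hj.le, hi0, hj0, f3, f4, f5, f6, Bool.and_assoc]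
    · rw [show ((i:Int) + -1) = ((i-1 : Nat) : Int) by omega]
      simp only [PySem.List.pyGetD_natCast, pvPit, pvG]
      have f3 : ((j:Int)+1 < (nums.length:Int)) ↔ (j+1 < nums.length) := by omega
      have f4 : ((i:Int)+1 < (nums.length:Int)) ↔ (i+1 < nums.length) := by omega
      have f5 : ((0:Int) ≤ ↑j+1) := by omega
      have f6 : ((0:Int) ≤ ↑i+1) := by omega
      have e0 : ¬((j:Int) + -1 ≥ 0) := by omega
      have g1 : 1 ≤ i := hi0
      simp [hi, hj, g1, hi.le, hj.le, hi0, hj0, e0, f3, f4, f5, f6, Bool.and_assoc]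
  · by_cases hj0 : 0 < j
    · rw [show ((j:Int) + -1) = ((j-1 : Nat) : Int) by omega]
      simp only [PySem.List.pyGetD_natCast, pvPit, pvG]
      have f3 : ((j:Int)+1 < (nums.length:Int)) ↔ (j+1 < nums.length) := by omega
      have f4 : ((i:Int)+1 < (nums.length:Int)) ↔ (i+1 < nums.length) := by omega
      have f5 : ((0:Int) ≤ ↑j+1) := by omega
      have f6 : ((0:Int) ≤ ↑i+1) := by omega
      have e0 : ¬((i:Int) + -1 ≥ 0) := by omega
      have g2 : 1 ≤ j := hj0
      simp [hi, hj, g2, hi.le, hj.le, hi0, hj0, e0, f3, f4, f5, f6, Bool.and_assoc]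
    · simp only [pvPit, pvG]
      have f3 : ((j:Int)+1 < (nums.length:Int)) ↔ (j+1 < nums.length) := by omega
      have f4 : ((i:Int)+1 < (nums.length:Int)) ↔ (i+1 < nums.length) := by omega
      have f5 : ((0:Int) ≤ ↑j+1) := by omega
      have f6 : ((0:Int) ≤ ↑i+1) := by omega
      have e0 : ¬((i:Int) + -1 ≥ 0) := by omega
      have e1 : ¬((j:Int) + -1 ≥ 0) := by omega
      simp [hi, hj, hi.le, hj.le, hi0, hj0, e0, e1, f3, f4, f5, f6]

theorem solution_eq_countA (nums : List (List Int)) :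
    solution nums = (List.range nums.length).foldl (fun a i =>
      (List.range nums.length).foldl (fun a j =>
        if pvPit nums i j then a + 1 else a) a) 0 := by
  simp only [solution]
  rw [pvRangeCast, List.foldl_map]
  apply PySem.List.foldl_congr_mem
  intro acc i hi
  rw [List.foldl_map]
  apply PySem.List.foldl_congr_mem
  intro acc2 j hj
  rw [pvFlagA nums i j (List.mem_range.mp hi) (List.mem_range.mp hj)]

def pvStep (nums : List (List Int)) (i : Nat) (bad : List Bool) (j : Nat) : List Bool :=
  let n := nums.length
  let bad :=
    if j + 1 < n then
      let bad := if pvG nums i j ≥ pvG nums i (j + 1) then bad.set (i * n + j) true else bad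
      if pvG nums i (j + 1) ≥ pvG nums i j then bad.set (i * n + j + 1) true else bad
    else bad
  if i + 1 < n then
    let bad := if pvG nums i j ≥ pvG nums (i + 1) j then bad.set (i * n + j) true else bad
    if pvG nums (i + 1) j ≥ pvG nums i j then bad.set ((i + 1) * n + j) true else bad
  else bad

theorem alt_eq_fold (nums : List (List Int)) :
    solution_alt nums = (((List.range nums.length).foldl (fun bad i =>
      (List.range nums.length).foldl (pvStep nums i) bad)
      (List.replicate (nums.length * nums.length) false)).count false : Nat) := by
  rfl

theorem pvSetGetD (b : List Bool) (idx p : Nat) (hidx : idx < b.length) :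
    (b.set idx true).getD p false = (b.getD p false || decide (p = idx)) := by
  by_cases hp : p = idx
  · subst hp; simp [List.getD, hidx]
  · rw [List.getD, List.getD, List.getElem?_set, if_neg (fun h => hp h.symm)]
    simp [hp]

theorem pvFoldLen {α : Type} (L : List α) (f : List Bool → α → List Bool) (N : Nat)
    (hlen : ∀ b a, a ∈ L → b.length = N → (f b a).length = N) :
    ∀ b0, b0.length = N → (L.foldl f b0).length = N := by
  induction L with
  | nil => intro b0 h; simpa using h
  | cons x xs ih =>
    intro b0 h
    simp only [List.foldl_cons]
    exact ih (fun b a ha hb => hlen b a (List.mem_cons_of_mem _ ha) hb)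
      (f b0 x) (hlen b0 x List.mem_cons_self h)

theorem pvFoldOr {α : Type} (L : List α) (f : List Bool → α → List Bool) (N : Nat)
    (m : α → Nat → Bool)
    (hlen : ∀ b a, a ∈ L → b.length = N → (f b a).length = N)
    (h : ∀ b a p, a ∈ L → b.length = N → (f b a).getD p false = (b.getD p false || m a p)) :
    ∀ b0, b0.length = N → ∀ p,
      (L.foldl f b0).getD p false = (b0.getD p false || L.any (fun a => m a p)) := by
  induction L with
  | nil => intro b0 _ p; simp
  | cons x xs ih =>
    intro b0 hb p
    simp only [List.foldl_cons, List.any_cons]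
    rw [ih (fun b a ha hb => hlen b a (List.mem_cons_of_mem _ ha) hb)
        (fun b a p ha hb => h b a p (List.mem_cons_of_mem _ ha) hb)
        (f b0 x) (hlen b0 x List.mem_cons_self hb) p,
      h b0 x p List.mem_cons_self hb]
    cases b0.getD p false <;> cases m x p <;> simp

theorem pvEncLt {n i j : Nat} (hi : i < n) (hj : j < n) : i * n + j < n * n := by
  calc i * n + j < i * n + n := by omega
    _ = (i + 1) * n := by ring
    _ ≤ n * n := Nat.mul_le_mul_right n hi

def pvMk (nums : List (List Int)) (i j p : Nat) : Bool :=
  let n := nums.length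
  ((decide (j + 1 < n) &&
      ((decide (p = i * n + j) && decide (pvG nums i j ≥ pvG nums i (j + 1))) ||
       (decide (p = i * n + j + 1) && decide (pvG nums i (j + 1) ≥ pvG nums i j)))) ||
   (decide (i + 1 < n) &&
      ((decide (p = i * n + j) && decide (pvG nums i j ≥ pvG nums (i + 1) j)) ||
       (decide (p = (i + 1) * n + j) && decide (pvG nums (i + 1) j ≥ pvG nums i j)))))

theorem pvStepLen (nums : List (List Int)) (i : Nat) (b : List Bool) (j : Nat) :
    (pvStep nums i b j).length = b.length := by
  simp only [pvStep]
  split_ifs <;> simp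

theorem pvCondSetLen (b : List Bool) (c : Prop) [Decidable c] (idx : Nat) :
    (if c then b.set idx true else b).length = b.length := by
  split_ifs <;> simp

theorem pvCondSet (b : List Bool) (c : Prop) [Decidable c] (idx p : Nat)
    (hidx : c → idx < b.length) :
    (if c then b.set idx true else b).getD p false =
      (b.getD p false || (decide c && decide (p = idx))) := by
  split_ifs with hc
  · rw [pvSetGetD _ _ _ (hidx hc)]; simp [hc]
  · simp [hc]

theorem pvStepChar (nums : List (List Int)) (i j : Nat)
    (hi : i < nums.length) (hj : j < nums.length)
    (b : List Bool) (hb : b.length = nums.length * nums.length) (p : Nat) :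
    (pvStep nums i b j).getD p false = (b.getD p false || pvMk nums i j p) := by
  simp only [pvStep, pvMk]
  by_cases h1 : j + 1 < nums.length <;> by_cases h2 : i + 1 < nums.length
  · simp only [if_pos h1, if_pos h2]
    rw [pvCondSet _ _ _ _ (fun _ => by simp only [pvCondSetLen, hb]; exact pvEncLt h2 hj),
        pvCondSet _ _ _ _ (fun _ => by simp only [pvCondSetLen, hb]; exact pvEncLt hi hj),
        pvCondSet _ _ _ _ (fun _ => by simp only [pvCondSetLen, hb]; exact pvEncLt hi h1),
        pvCondSet _ _ _ _ (fun _ => by simp only [hb]; exact pvEncLt hi hj)]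
    simp [h1, h2, Bool.and_comm, Bool.or_assoc, Bool.or_comm, Bool.or_left_comm]
  · simp only [if_pos h1, if_neg h2]
    rw [pvCondSet _ _ _ _ (fun _ => by simp only [pvCondSetLen, hb]; exact pvEncLt hi h1),
        pvCondSet _ _ _ _ (fun _ => by simp only [hb]; exact pvEncLt hi hj)]
    simp [h1, h2, Bool.and_comm, Bool.or_assoc, Bool.or_comm]
  · simp only [if_neg h1, if_pos h2]
    rw [pvCondSet _ _ _ _ (fun _ => by simp only [pvCondSetLen, hb]; exact pvEncLt h2 hj),
        pvCondSet _ _ _ _ (fun _ => by simp only [hb]; exact pvEncLt hi hj)]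
    simp [h1, h2, Bool.and_comm, Bool.or_assoc, Bool.or_comm]
  · simp only [if_neg h1, if_neg h2]
    simp [h1, h2]

def pvMarked (nums : List (List Int)) (p : Nat) : Bool :=
  (List.range nums.length).any (fun i =>
    (List.range nums.length).any (fun j => pvMk nums i j p))

theorem pvBadChar (nums : List (List Int)) :
    ∀ p, (((List.range nums.length).foldl (fun bad i =>
      (List.range nums.length).foldl (pvStep nums i) bad)
      (List.replicate (nums.length * nums.length) false)).getD p false) = pvMarked nums p := by
  intro p
  have hlen1 : ∀ (b : List Bool) (i : Nat), i ∈ List.range nums.length →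
      b.length = nums.length * nums.length →
      ((List.range nums.length).foldl (pvStep nums i) b).length =
        nums.length * nums.length := by
    intro b i _ hb
    exact pvFoldLen _ _ _ (fun b' j _ hb' => by rw [pvStepLen]; exact hb') b hb
  have h1 : ∀ (b : List Bool) (i : Nat) (p : Nat), i ∈ List.range nums.length →
      b.length = nums.length * nums.length →
      ((List.range nums.length).foldl (pvStep nums i) b).getD p false =
        (b.getD p false || (List.range nums.length).any (fun j => pvMk nums i j p)) := by
    intro b i p hi hb
    exact pvFoldOr _ _ (nums.length * nums.length) (fun j p => pvMk nums i j p)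
      (fun b' j _ hb' => by rw [pvStepLen]; exact hb')
      (fun b' j p' hj hb' =>
        pvStepChar nums i j (List.mem_range.mp hi) (List.mem_range.mp hj) b' hb' p')
      b hb p
  rw [pvFoldOr _ _ (nums.length * nums.length)
      (fun i p => (List.range nums.length).any (fun j => pvMk nums i j p))
      hlen1 h1 _ (by simp) p]
  simp [pvMarked, List.getD]

theorem pvEncInj {n i j i' j' : Nat} (hj : j < n) (hj' : j' < n)
    (h : i * n + j = i' * n + j') : i = i' ∧ j = j' := by
  have h' : n * i + j = n * i' + j' := by rw [Nat.mul_comm n i, Nat.mul_comm n i']; exact h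
  have hn : 0 < n := by omega
  have d1 : (n * i + j) / n = i := by rw [Nat.mul_add_div hn, Nat.div_eq_of_lt hj]; omega
  have d2 : (n * i' + j') / n = i' := by rw [Nat.mul_add_div hn, Nat.div_eq_of_lt hj']; omega
  have e : i = i' := by rw [← d1, ← d2, h']
  subst e
  exact ⟨rfl, by omega⟩

theorem pvMarkedIff (nums : List (List Int)) (i j : Nat)
    (hi : i < nums.length) (hj : j < nums.length) :
    pvMarked nums (i * nums.length + j) = !pvPit nums i j := by
  rw [Bool.eq_iff_iff]
  simp only [pvMarked, pvPit, pvMk, List.any_eq_true, List.mem_range, Bool.or_eq_true,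
    Bool.and_eq_true, Bool.not_not, decide_eq_true_eq]
  constructor
  · rintro ⟨i', hi', j', hj', h⟩
    rcases h with ⟨hg, ⟨hp, hc⟩ | ⟨hp, hc⟩⟩ | ⟨hg, ⟨hp, hc⟩ | ⟨hp, hc⟩⟩
    · obtain ⟨rfl, rfl⟩ := pvEncInj hj (by omega) hp
      exact Or.inl (Or.inl (Or.inr ⟨hg, hc⟩))
    · obtain ⟨e1, e2⟩ := pvEncInj hj hg
        (by omega : i * nums.length + j = i' * nums.length + (j' + 1))
      subst e1
      refine Or.inr ⟨by omega, ?_⟩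
      rw [show j - 1 = j' by omega, show j = j' + 1 from e2]
      exact hc
    · obtain ⟨rfl, rfl⟩ := pvEncInj hj hj' hp
      exact Or.inl (Or.inr ⟨hg, hc⟩)
    · obtain ⟨e1, e2⟩ := pvEncInj hj hj' hp
      subst e2
      refine Or.inl (Or.inl (Or.inl ⟨by omega, ?_⟩))
      rw [show i - 1 = i' by omega, show i = i' + 1 from e1]
      exact hc
  · rintro (((⟨hi0, hc⟩ | ⟨hg, hc⟩) | ⟨hg, hc⟩) | ⟨hj0, hc⟩)
    · refine ⟨i - 1, by omega, j, hj, ?_⟩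
      rw [show i - 1 + 1 = i by omega]
      exact Or.inr ⟨hi, Or.inr ⟨rfl, hc⟩⟩
    · exact ⟨i, hi, j, hj, Or.inl ⟨hg, Or.inl ⟨rfl, hc⟩⟩⟩
    · exact ⟨i, hi, j, hj, Or.inr ⟨hg, Or.inl ⟨rfl, hc⟩⟩⟩
    · refine ⟨i, hi, j - 1, by omega, ?_⟩
      rw [show j - 1 + 1 = j by omega]
      exact Or.inl ⟨hj, Or.inr ⟨by omega, hc⟩⟩

theorem pvListAsMap (l : List Bool) :
    l = (List.range l.length).map (fun p => l.getD p false) := by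
  apply List.ext_getElem
  · simp
  · intro p h1 h2
    simp [List.getD_eq_getElem?_getD, List.getElem?_eq_getElem h1]

theorem pvCountFalse (l : List Bool) :
    l.count false = (List.range l.length).countP (fun p => !(l.getD p false)) := by
  conv_lhs => rw [pvListAsMap l]
  rw [List.count, List.countP_map]
  apply List.countP_congr
  intro p _
  cases h : l[p]?.getD false <;> simp [List.getD, h]

theorem pvCountPRangeMul (n : Nat) (q : Nat → Bool) (m : Nat) :
    (List.range (m * n)).countP q =
      ((List.range m).map (fun i => (List.range n).countP (fun j => q (i * n + j)))).sum := by
  induction m with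
  | zero => simp
  | succ m ih =>
    rw [show (m + 1) * n = m * n + n by ring, List.range_add, List.countP_append, ih,
      List.range_succ]
    simp [List.countP_map]
    rfl

theorem pvFoldIf (c : Nat → Bool) (l : List Nat) : ∀ a : Int,
    l.foldl (fun a j => if c j then a + 1 else a) a = a + l.countP c := by
  induction l with
  | nil => intro a; simp
  | cons x xs ih =>
    intro a
    rw [List.foldl_cons, ih, List.countP_cons]
    by_cases h : c x
    · simp only [h, if_pos]
      push_cast
      ring
    · simp [h]

theorem pvCountAEq (nums : List (List Int)) :
    (List.range nums.length).foldl (fun a i =>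
      (List.range nums.length).foldl (fun a j =>
        if pvPit nums i j then a + 1 else a) a) 0 =
    ((List.range nums.length).map
      (fun i => (((List.range nums.length).countP (fun j => pvPit nums i j) : Nat) : Int))).sum := by
  have e0 : (List.range nums.length).foldl (fun a i =>
      (List.range nums.length).foldl (fun a j =>
        if pvPit nums i j then a + 1 else a) a) (0 : Int) =
      (List.range nums.length).foldl (fun (a : Int) i =>
        a + ((List.range nums.length).countP (fun j => pvPit nums i j) : Int)) 0 :=
    PySem.List.foldl_congr_mem _ _ _ _
      (fun a i _ => pvFoldIf (fun j => pvPit nums i j) (List.range nums.length) a)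
  rw [e0, PySem.List.foldl_add]
  simp

theorem pvAltEqCountA (nums : List (List Int)) :
    solution_alt nums = (List.range nums.length).foldl (fun a i =>
      (List.range nums.length).foldl (fun a j =>
        if pvPit nums i j then a + 1 else a) a) 0 := by
  rw [alt_eq_fold, pvCountAEq]
  have hlenF : (((List.range nums.length).foldl (fun bad i =>
      (List.range nums.length).foldl (pvStep nums i) bad)
      (List.replicate (nums.length * nums.length) false))).length =
      nums.length * nums.length := by
    exact pvFoldLen _ _ _
      (fun b i _ hb => pvFoldLen _ _ _ (fun b' j _ hb' => by rw [pvStepLen]; exact hb') b hb)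
      _ (by simp)
  rw [pvCountFalse, hlenF]
  have e1 : (List.range (nums.length * nums.length)).countP
      (fun p => !((((List.range nums.length).foldl (fun bad i =>
        (List.range nums.length).foldl (pvStep nums i) bad)
        (List.replicate (nums.length * nums.length) false))).getD p false)) =
      (List.range (nums.length * nums.length)).countP (fun p => !(pvMarked nums p)) := by
    apply List.countP_congr
    intro p _
    rw [pvBadChar]
  rw [e1, pvCountPRangeMul nums.length _ nums.length]
  have e2 : (List.range nums.length).map
      (fun i => (List.range nums.length).countP (fun j => !(pvMarked nums (i * nums.length + j)))) =
      (List.range nums.length).map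
      (fun i => (List.range nums.length).countP (fun j => pvPit nums i j)) := by
    apply List.map_congr_left
    intro i hi
    apply List.countP_congr
    intro j hj
    rw [pvMarkedIff nums i j (List.mem_range.mp hi) (List.mem_range.mp hj), Bool.not_not]
  rw [e2, Nat.cast_list_sum, List.map_map]
  rfl

-- ===== VERDICT (by name: the statement is the Claim_ definition above) =====
theorem solution_spec : Claim_equal_solution := by
  intro nums _ _
  unfold Spec_solution
  rw [solution_eq_countA nums, pvAltEqCountA nums]
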